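-- pv_equiv track=rewrite | github.com/guillaume-havard/dispersion | src/filters.py | blur_average
-- ===== SOURCE A (Python) =====
-- def blur_average(levels, matrix):
--     """
--     levels [in] : liste(liste(Int)) : image en niveau
--     matrix [in] : matrix size (pour le moment)
--     """
--     win = matrix//2
--
--     res = []
--
--     for x in range(len(levels)):
--         res.append([])
--         for y in range(len(levels[x])):
--             res[x].append(0)
--             if not win <= x < len(levels) - win:
--                 continue
--             if not win <= y < len(levels[0]) - win:
--                 continue
--
--             somme = 0
--             for i in range(-win, win +1):
--                 for j in range(-win, win +1):
--                     somme += levels[x+i][y+j]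
--
--             res[x][y] = somme // (matrix*matrix)
--
--
--     return res
-- ===== SOURCE B (Python) =====
-- def blur_average(levels, matrix):
--     """
--     levels [in] : liste(liste(Int)) : image en niveau
--     matrix [in] : matrix size (pour le moment)
--     """
--     win = matrix // 2
--     H = len(levels)
--     W0 = len(levels[0]) if levels else 0
--     area = matrix * matrix
--     # per-row prefix sums: pref[r][k] = sum of the first k entries of row r,
--     # so each window row contributes pref[i][y+win+1] - pref[i][y-win]
--     pref = []
--     for row in levels:
--         p = [0]
--         acc = 0
--         for v in row:
--             acc += v
--             p.append(acc)
--         pref.append(p)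
--     res = []
--     for x in range(H):
--         n = len(levels[x])
--         if win <= x < H - win:
--             lo = win if 0 < win else 0
--             hi = n if n < W0 - win else W0 - win
--             row_out = []
--             for y in range(n):
--                 if lo <= y < hi:
--                     s = 0
--                     for i in range(x - win, x + win + 1):
--                         pi = pref[i]
--                         s += pi[y + win + 1] - pi[y - win]
--                     row_out.append(s // area)
--                 else:
--                     row_out.append(0)
--         else:
--             row_out = [0] * n
--         res.append(row_out)
--     return res
-- ===== Notes on version B (the rewrite author's own statement) =====
-- stated objective: alternative
-- what changed: B precomputes per-row prefix sums once and obtains each window row's contribution as a difference of two prefix sums, replacing A's nested i/j scan over the whole matrix x matrix window with a single loop over window rows (O(matrix) instead of O(matrix^2) work per cell, though not measurably faster on the generated inputs).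
import Mathlib
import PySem

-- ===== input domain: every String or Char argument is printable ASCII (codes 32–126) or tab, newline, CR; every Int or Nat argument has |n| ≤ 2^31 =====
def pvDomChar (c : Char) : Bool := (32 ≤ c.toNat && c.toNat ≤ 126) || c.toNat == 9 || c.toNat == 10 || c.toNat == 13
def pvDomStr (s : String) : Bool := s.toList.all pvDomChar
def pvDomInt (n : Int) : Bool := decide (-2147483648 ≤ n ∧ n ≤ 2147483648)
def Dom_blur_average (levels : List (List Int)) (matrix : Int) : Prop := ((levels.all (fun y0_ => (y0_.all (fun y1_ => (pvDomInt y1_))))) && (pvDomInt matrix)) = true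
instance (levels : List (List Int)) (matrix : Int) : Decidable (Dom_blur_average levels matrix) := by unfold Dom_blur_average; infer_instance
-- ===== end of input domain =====

-- B computes window sums from per-row prefix sums (one loop over window rows) instead of A's nested scan over every window cell; alternative algorithm, same results.


-- ===== PORT A =====
def blur_average (levels : List (List Int)) (matrix : Int) : List (List Int) :=
  let win := PySem.Int.floordiv matrix 2
  (PySem.List.pyRange 0 (levels.length : Int) 1).map (fun x =>
    (PySem.List.pyRange 0 ((PySem.List.pyGetD levels x []).length : Int) 1).map (fun y =>
      if ¬(win ≤ x ∧ x < (levels.length : Int) - win) then 0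
      else if ¬(win ≤ y ∧ y < ((PySem.List.pyGetD levels 0 []).length : Int) - win) then 0
      else
        let somme := (PySem.List.pyRange (-win) (win + 1) 1).foldl (fun s i =>
          (PySem.List.pyRange (-win) (win + 1) 1).foldl (fun s j =>
            s + PySem.List.pyGetD (PySem.List.pyGetD levels (x + i) []) (y + j) 0) s) 0
        PySem.Int.floordiv somme (matrix * matrix)))

-- ===== PORT B =====
-- prefix sums of a row: p = [0]; acc = 0; for v in row: acc += v; p.append(acc)
def pvPresum (row : List Int) : List Int :=
  (row.foldl (fun st v => (st.1 ++ [st.2 + v], st.2 + v)) (([0], 0) : List Int × Int)).1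

def blur_average_alt (levels : List (List Int)) (matrix : Int) : List (List Int) :=
  let win := PySem.Int.floordiv matrix 2
  let H := (levels.length : Int)
  let W0 := ((PySem.List.pyGetD levels 0 []).length : Int)
  let area := matrix * matrix
  let pref := levels.map pvPresum
  (PySem.List.pyRange 0 H 1).map (fun x =>
    let n := ((PySem.List.pyGetD levels x []).length : Int)
    if win ≤ x ∧ x < H - win then
      let lo := if 0 < win then win else 0
      let hi := if n < W0 - win then n else W0 - win
      (PySem.List.pyRange 0 n 1).map (fun y =>
        if lo ≤ y ∧ y < hi then
          let s := (PySem.List.pyRange (x - win) (x + win + 1) 1).foldl (fun s i =>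
            let pi := PySem.List.pyGetD pref i []
            s + (PySem.List.pyGetD pi (y + win + 1) 0 - PySem.List.pyGetD pi (y - win) 0)) 0
          PySem.Int.floordiv s area
        else 0)
    else PySem.List.pyRepeat [0] n)

-- ===== PRECONDITION & SPEC =====
-- Pre_ excludes exactly the inputs on which A raises: matrix = 0 while some cell lies in the
-- averaging interior (ZeroDivisionError), and ragged inputs whose window indexing reaches past
-- the end of a shorter row (IndexError).
def Pre_blur_average (levels : List (List Int)) (matrix : Int) : Prop :=
  ∀ x ∈ List.range levels.length, ∀ y ∈ List.range (levels.getD x []).length,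
    ((PySem.Int.floordiv matrix 2 ≤ (x : Int) ∧ (x : Int) < (levels.length : Int) - PySem.Int.floordiv matrix 2) ∧
     (PySem.Int.floordiv matrix 2 ≤ (y : Int) ∧ (y : Int) < ((levels.getD 0 []).length : Int) - PySem.Int.floordiv matrix 2)) →
      matrix ≠ 0 ∧
      ∀ i ∈ List.range levels.length,
        ((x : Int) - PySem.Int.floordiv matrix 2 ≤ (i : Int) ∧ (i : Int) ≤ (x : Int) + PySem.Int.floordiv matrix 2) →
          (y : Int) + PySem.Int.floordiv matrix 2 < ((levels.getD i []).length : Int)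

instance (levels : List (List Int)) (matrix : Int) : Decidable (Pre_blur_average levels matrix) := by
  unfold Pre_blur_average; infer_instance

def pvWitness_blur_average : List (List Int) × Int := ([[1, 2, 3], [4, 5, 6], [7, 8, 9]], 3)

def Spec_blur_average (levels : List (List Int)) (matrix : Int) (out : List (List Int)) : Prop := out = blur_average_alt levels matrix
instance (levels : List (List Int)) (matrix : Int) (out : List (List Int)) : Decidable (Spec_blur_average levels matrix out) := by unfold Spec_blur_average; infer_instance

-- ===== CLAIM (what is proved, stated in full; the proofs are below) =====
def Claim_equal_blur_average : Prop := ∀ (levels : List (List Int)) (matrix : Int), Dom_blur_average levels matrix → Pre_blur_average levels matrix → Spec_blur_average levels matrix (blur_average levels matrix)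

-- ===== LEMMAS AND PROOFS =====

theorem pvPresum_aux (row : List Int) : ∀ (p : List Int) (a : Int),
    (row.foldl (fun st v => (st.1 ++ [st.2 + v], st.2 + v)) ((p, a) : List Int × Int)).1
      = p ++ (List.range row.length).map (fun k => a + ((row.take (k+1)).sum)) := by
  induction row with
  | nil => intro p a; simp
  | cons v t ih =>
    intro p a
    simp only [List.foldl_cons]
    rw [ih]
    rw [List.length_cons, List.range_succ_eq_map]
    simp [List.map_map, Function.comp, add_assoc]

theorem pvPresum_eq (row : List Int) :
    pvPresum row = (List.range (row.length + 1)).map (fun k => (row.take k).sum) := by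
  unfold pvPresum
  rw [pvPresum_aux, List.range_succ_eq_map]
  simp [List.map_map, Function.comp]

theorem getD_pvPresum (row : List Int) (k : Nat) (h : k ≤ row.length) :
    (pvPresum row).getD k 0 = (row.take k).sum := by
  rw [pvPresum_eq, PySem.List.getD_map_range _ _ _ _ (by omega)]

theorem take_sum_succ (row : List Int) (n : Nat) (h : n < row.length) :
    (row.take (n+1)).sum = (row.take n).sum + row.getD n 0 := by
  rw [List.getD_eq_getElem _ _ h]
  exact List.sum_take_succ row n h

theorem seg_sum (row : List Int) (a m : Nat) (h : a + m ≤ row.length) :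
    ((List.range m).map (fun k => row.getD (a+k) 0)).sum
      = (row.take (a+m)).sum - (row.take a).sum := by
  induction m with
  | zero => simp
  | succ m ih =>
    rw [List.range_succ]
    simp only [List.map_append, List.sum_append, List.map_cons, List.map_nil, List.sum_cons,
      List.sum_nil, add_zero]
    rw [ih (by omega)]
    have h2 := take_sum_succ row (a+m) (by omega)
    have : a + (m+1) = (a + m) + 1 := by omega
    rw [this, h2]
    ring

theorem window_sum (row : List Int) (y win s0 : Int) (hw : 0 ≤ win) (h1 : win ≤ y)
    (h2 : y + win < (row.length : Int)) :
    (PySem.List.pyRange (-win) (win + 1)).foldl (fun s j => s + PySem.List.pyGetD row (y + j) 0) s0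
      = s0 + ((pvPresum row).getD (y + win + 1).toNat 0 - (pvPresum row).getD (y - win).toNat 0) := by
  rw [PySem.List.foldl_add]
  congr 1
  rw [PySem.List.pyRange_one, List.map_map]
  have hmc : ∀ k ∈ List.range (win + 1 - -win).toNat,
      ((fun j => PySem.List.pyGetD row (y + j) 0) ∘ fun k : Nat => -win + (k:Int)) k
        = row.getD ((y - win).toNat + k) 0 := by
    intro k hk
    show PySem.List.pyGetD row (y + (-win + (k:Int))) 0 = _
    have he : y + (-win + (k:Int)) = (((y - win).toNat + k : Nat) : Int) := by push_cast; omega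
    rw [he, PySem.List.pyGetD_natCast]
  rw [List.map_congr_left hmc]
  rw [seg_sum row _ _ (by omega)]
  rw [getD_pvPresum row _ (by omega), getD_pvPresum row _ (by omega)]
  have : (y - win).toNat + (win + 1 - -win).toNat = (y + win + 1).toNat := by omega
  rw [this]

-- ===== VERDICT (by name: the statement is the Claim_ definition above) =====
theorem blur_average_spec : Claim_equal_blur_average := by
  intro levels matrix _dom pre
  unfold Spec_blur_average blur_average blur_average_alt
  dsimp only
  set win := PySem.Int.floordiv matrix 2 with hwin
  apply List.map_congr_left
  intro x hx
  rw [PySem.List.mem_pyRange_one] at hx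
  obtain ⟨hx0, hxH⟩ := hx
  have hrowx : PySem.List.pyGetD levels x [] = levels.getD x.toNat [] :=
    PySem.List.pyGetD_of_nonneg _ _ hx0
  have hW0 : PySem.List.pyGetD levels 0 [] = levels.getD 0 [] := by
    have := PySem.List.pyGetD_natCast levels 0 []
    simpa using this
  by_cases hxc : win ≤ x ∧ x < (levels.length : Int) - win
  · rw [if_pos hxc]
    apply List.map_congr_left
    intro y hy
    rw [PySem.List.mem_pyRange_one] at hy
    obtain ⟨hy0, hyn⟩ := hy
    rw [if_neg (not_not_intro hxc)]
    by_cases hyc : win ≤ y ∧ y < ((PySem.List.pyGetD levels 0 []).length : Int) - win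
    · rw [if_neg (not_not_intro hyc)]
      rw [if_pos (by obtain ⟨hy1, hy2⟩ := hyc; constructor <;> split_ifs <;> omega)]
      congr 1
      -- extract Pre at (x.toNat, y.toNat)
      have hxlt : x.toNat < levels.length := by omega
      have hylt : y.toNat < (levels.getD x.toNat []).length := by
        rw [← hrowx]; omega
      have hxx : ((x.toNat : Nat) : Int) = x := Int.toNat_of_nonneg hx0
      have hyy : ((y.toNat : Nat) : Int) = y := Int.toNat_of_nonneg hy0
      have hpre := pre x.toNat (List.mem_range.mpr hxlt) y.toNat (List.mem_range.mpr hylt)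
      rw [hxx, hyy, ← hW0] at hpre
      obtain ⟨-, hwide⟩ := hpre ⟨hxc, hyc⟩
      -- A's nested window sum rewritten into per-row prefix-sum differences
      have hAside :
          (PySem.List.pyRange (-win) (win + 1)).foldl (fun s i =>
              (PySem.List.pyRange (-win) (win + 1)).foldl (fun s j =>
                s + PySem.List.pyGetD (PySem.List.pyGetD levels (x + i) []) (y + j) 0) s) 0
            = (PySem.List.pyRange (-win) (win + 1)).foldl (fun s i =>
                s + ((pvPresum (levels.getD (x + i).toNat [])).getD (y + win + 1).toNat 0
                   - (pvPresum (levels.getD (x + i).toNat [])).getD (y - win).toNat 0)) 0 := by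
        apply PySem.List.foldl_congr_mem
        intro s i hi
        rw [PySem.List.mem_pyRange_one] at hi
        have hw : 0 ≤ win := by omega
        have hxi0 : 0 ≤ x + i := by omega
        have hxiH : (x + i).toNat < levels.length := by omega
        have hxi : ((x + i).toNat : Int) = x + i := Int.toNat_of_nonneg hxi0
        have hlen : y + win < ((levels.getD (x + i).toNat []).length : Int) := by
          refine hwide (x + i).toNat (List.mem_range.mpr hxiH) ?_
          rw [hxi]; omega
        rw [PySem.List.pyGetD_of_nonneg _ _ hxi0]
        exact window_sum _ y win s hw hyc.1 hlen
      -- B's loop body: resolve the pref lookups into the same prefix-sum differences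
      have hBside :
          (PySem.List.pyRange (x - win) (x + win + 1)).foldl (fun s i =>
              s + (PySem.List.pyGetD (PySem.List.pyGetD (levels.map pvPresum) i []) (y + win + 1) 0
                 - PySem.List.pyGetD (PySem.List.pyGetD (levels.map pvPresum) i []) (y - win) 0)) 0
            = (PySem.List.pyRange (x - win) (x + win + 1)).foldl (fun s i =>
                s + ((pvPresum (levels.getD i.toNat [])).getD (y + win + 1).toNat 0
                   - (pvPresum (levels.getD i.toNat [])).getD (y - win).toNat 0)) 0 := by
        apply PySem.List.foldl_congr_mem
        intro s i hi
        rw [PySem.List.mem_pyRange_one] at hi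
        have hw : 0 ≤ win := by omega
        have hi0 : 0 ≤ i := by omega
        have hiH : i.toNat < levels.length := by omega
        have hpi : PySem.List.pyGetD (levels.map pvPresum) i [] = pvPresum (levels.getD i.toNat []) := by
          rw [PySem.List.pyGetD_of_nonneg _ _ hi0,
            List.getD_eq_getElem _ _ (by simpa using hiH), List.getElem_map,
            List.getD_eq_getElem _ _ hiH]
        rw [hpi, PySem.List.pyGetD_of_nonneg _ _ (by omega : (0:Int) ≤ y + win + 1),
          PySem.List.pyGetD_of_nonneg _ _ (by omega : (0:Int) ≤ y - win)]
      rw [hAside, hBside]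
      rw [PySem.List.foldl_add, PySem.List.foldl_add]
      congr 1
      -- reindex: sum over i ∈ [-win, win] of D (x + i)  =  sum over i ∈ [x-win, x+win] of D i
      rw [PySem.List.pyRange_one (-win) (win + 1), PySem.List.pyRange_one (x - win) (x + win + 1),
        List.map_map, List.map_map]
      have hM : (win + 1 - -win).toNat = (x + win + 1 - (x - win)).toNat := by omega
      rw [hM]
      apply congrArg
      apply List.map_congr_left
      intro k _
      show (pvPresum (levels.getD (x + (-win + (k:Int))).toNat [])).getD (y + win + 1).toNat 0
            - (pvPresum (levels.getD (x + (-win + (k:Int))).toNat [])).getD (y - win).toNat 0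
          = (pvPresum (levels.getD (x - win + (k:Int)).toNat [])).getD (y + win + 1).toNat 0
            - (pvPresum (levels.getD (x - win + (k:Int)).toNat [])).getD (y - win).toNat 0
      have : x + (-win + (k:Int)) = x - win + (k:Int) := by ring
      rw [this]
    · rw [if_pos hyc]
      rw [if_neg (by split_ifs <;> omega)]
  · rw [if_neg hxc]
    rw [PySem.List.pyRepeat_singleton]
    have : ∀ y ∈ PySem.List.pyRange 0 ((PySem.List.pyGetD levels x []).length : Int),
        (if ¬(win ≤ x ∧ x < (levels.length : Int) - win) then (0:Int)
         else if ¬(win ≤ y ∧ y < ((PySem.List.pyGetD levels 0 []).length : Int) - win) then 0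
         else
           PySem.Int.floordiv
             ((PySem.List.pyRange (-win) (win + 1)).foldl (fun s i =>
               (PySem.List.pyRange (-win) (win + 1)).foldl (fun s j =>
                 s + PySem.List.pyGetD (PySem.List.pyGetD levels (x + i) []) (y + j) 0) s) 0)
             (matrix * matrix)) = 0 := by
      intro y _
      rw [if_pos hxc]
    rw [List.map_congr_left this]
    simp [List.map_const', PySem.List.length_pyRange_one]
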